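-- pv_equiv track=rewrite | github.com/naglemi/mango | tmux/configure-menu.py | generate_menu_config
-- ===== SOURCE A (Python) =====
-- def generate_menu_config(items):
--     """Generate the display-menu configuration lines"""
--     lines = []
--     prev_was_core = None
--
--     for i, (name, key, cmd, is_core) in enumerate(items):
--         # Add separator between core and non-core items
--         if prev_was_core is True and is_core is False:
--             lines.append('    "" \\')
--
--         prev_was_core = is_core
--
--         # Format menu item - backslash on all lines EXCEPT the very last one
--         is_last_item = (i == len(items) - 1)
--         if is_last_item:
--             lines.append(f'    "{name:<20}" {key} "{cmd}"')
--         else: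
--             lines.append(f'    "{name:<20}" {key} "{cmd}" \\')
--
--     return lines
-- ===== SOURCE B (Python) =====
-- def generate_menu_config(items):
--     """Generate the display-menu configuration lines"""
--     # Run-length group consecutive items by their is_core flag.
--     groups = []
--     for it in items:
--         if groups and groups[-1][0] == it[3]:
--             groups[-1][1].append(it)
--         else:
--             groups.append([it[3], [it]])
--     if not groups:
--         return []
--     # Emit content lines: the first group's lines, then for each later group a
--     # bare '    ""' separator when that group is non-core, followed by its lines.
--     body = [f'    "{name:<20}" {key} "{cmd}"' for name, key, cmd, _ in groups[0][1]]
--     for flag, grp in groups[1:]: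
--         if not flag:
--             body.append('    ""')
--         for name, key, cmd, _ in grp:
--             body.append(f'    "{name:<20}" {key} "{cmd}"')
--     # Every line continues with ' \' except the very last.
--     return [l + ' \\' for l in body[:-1]] + body[-1:]
-- ===== Notes on version B (the rewrite author's own statement) =====
-- stated objective: alternative
-- what changed: Replaces the stateful single pass (prev_was_core flag plus enumerate/len last-index test) with run-length grouping: items are first grouped into maximal runs of equal is_core, then content lines are emitted per group with a bare separator before every later non-core group, and a final pass adds the ' \' continuation to all but the last line.
import Mathlib
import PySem

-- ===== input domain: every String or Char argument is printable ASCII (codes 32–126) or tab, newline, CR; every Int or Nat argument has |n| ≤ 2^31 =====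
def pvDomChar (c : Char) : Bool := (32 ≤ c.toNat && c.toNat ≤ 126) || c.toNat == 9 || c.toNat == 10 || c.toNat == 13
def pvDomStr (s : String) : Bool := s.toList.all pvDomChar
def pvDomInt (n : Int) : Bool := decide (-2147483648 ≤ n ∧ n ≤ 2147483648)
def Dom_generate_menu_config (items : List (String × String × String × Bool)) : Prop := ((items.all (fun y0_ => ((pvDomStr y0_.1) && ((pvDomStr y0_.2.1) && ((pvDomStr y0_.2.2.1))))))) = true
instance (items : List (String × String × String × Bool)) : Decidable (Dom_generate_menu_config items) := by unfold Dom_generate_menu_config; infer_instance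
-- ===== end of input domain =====

-- B replaces the stateful single pass by run-length grouping on is_core plus a
-- final decoration pass adding ' \' to all but the last line (objective: alternative).


-- ===== PORT A =====
-- f'    "{name:<20}" {key} "{cmd}"': pad name to width 20 with spaces; exact on the ASCII
-- domain since Python's len counts code points, matching toList.length.
def pvFmt (name key cmd : String) : String :=
  "    \"" ++ name ++ String.mk (List.replicate (20 - name.toList.length) ' ') ++ "\" "
    ++ key ++ " \"" ++ cmd ++ "\""

def generate_menu_config (items : List (String × String × String × Bool)) : List String :=
  ((PySem.List.enumerate items 0).foldl
    (fun (st : List String × Option Bool) p =>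
      let lines := if st.2 = some true ∧ p.2.2.2.2 = false then st.1 ++ ["    \"\" \\"] else st.1
      let is_last := p.1 = (items.length : Int) - 1
      let lines := if is_last then lines ++ [pvFmt p.2.1 p.2.2.1 p.2.2.2.1]
                   else lines ++ [pvFmt p.2.1 p.2.2.1 p.2.2.2.1 ++ " \\"]
      (lines, some p.2.2.2.2))
    ([], none)).1

-- ===== PORT B =====
-- grouping step: append to the last run if its flag equals it.3, else open a new run
def pvStepB (gs : List (Bool × List (String × String × String × Bool)))
    (it : String × String × String × Bool) :
    List (Bool × List (String × String × String × Bool)) :=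
  match gs.getLast? with
  | some (b, g) => if b = it.2.2.2 then gs.dropLast ++ [(b, g ++ [it])]
                   else gs ++ [(it.2.2.2, [it])]
  | none => gs ++ [(it.2.2.2, [it])]

def generate_menu_config_alt (items : List (String × String × String × Bool)) : List String :=
  let groups := items.foldl pvStepB []
  match groups with
  | [] => []
  | (_, g0) :: gtail =>
    let body := g0.map (fun it => pvFmt it.1 it.2.1 it.2.2.1) ++
      gtail.foldl (fun acc p =>
        (if p.1 = false then acc ++ ["    \"\""] else acc)
          ++ p.2.map (fun it => pvFmt it.1 it.2.1 it.2.2.1)) []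
    body.dropLast.map (fun l => l ++ " \\") ++ body.getLast?.toList

-- ===== PRECONDITION & SPEC =====
def Spec_generate_menu_config (items : List (String × String × String × Bool)) (out : List String) : Prop := out = generate_menu_config_alt items
instance (items : List (String × String × String × Bool)) (out : List String) : Decidable (Spec_generate_menu_config items out) := by unfold Spec_generate_menu_config; infer_instance

-- ===== CLAIM (what is proved, stated in full; the proofs are below) =====
def Claim_equal_generate_menu_config : Prop := ∀ (items : List (String × String × String × Bool)), Dom_generate_menu_config items → Spec_generate_menu_config items (generate_menu_config items)

-- ===== LEMMAS AND PROOFS =====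

-- structural description of A's output
def gSpec : Option Bool → List (String × String × String × Bool) → List String
  | _, [] => []
  | prev, (n, k, c, ic) :: rest =>
    (if prev = some true ∧ ic = false then ["    \"\" \\"] else []) ++
    (if rest = [] then [pvFmt n k c] else [pvFmt n k c ++ " \\"]) ++ gSpec (some ic) rest

-- undecorated content lines with prev-state semantics
def rawSpec : Option Bool → List (String × String × String × Bool) → List String
  | _, [] => []
  | prev, (n, k, c, ic) :: rest =>
    (if prev = some true ∧ ic = false then ["    \"\""] else []) ++
    [pvFmt n k c] ++ rawSpec (some ic) rest

def decorate (xs : List String) : List String :=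
  xs.dropLast.map (fun l => l ++ " \\") ++ xs.getLast?.toList

def fmtI (it : String × String × String × Bool) : String := pvFmt it.1 it.2.1 it.2.2.1

-- recursive run-length grouping with an open run (b, g)
def runsFrom (b : Bool) (g : List (String × String × String × Bool)) :
    List (String × String × String × Bool) → List (Bool × List (String × String × String × Bool))
  | [] => [(b, g)]
  | x :: xs => if b = x.2.2.2 then runsFrom b (g ++ [x]) xs
               else (b, g) :: runsFrom x.2.2.2 [x] xs

def tailEmit (gs : List (Bool × List (String × String × String × Bool))) : List String :=
  gs.flatMap (fun p => (if p.1 = false then ["    \"\""] else []) ++ p.2.map fmtI)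

def bodyOf (gs : List (Bool × List (String × String × String × Bool))) : List String :=
  match gs with
  | [] => []
  | (_, g0) :: rest => g0.map fmtI ++ tailEmit rest

theorem foldA (n : Int) (l : List (String × String × String × Bool)) :
    ∀ (s : Int) (acc : List String) (prev : Option Bool), s + l.length = n →
    ((PySem.List.enumerate l s).foldl
      (fun (st : List String × Option Bool) p =>
        let lines := if st.2 = some true ∧ p.2.2.2.2 = false then st.1 ++ ["    \"\" \\"] else st.1
        let is_last := p.1 = n - 1
        let lines := if is_last then lines ++ [pvFmt p.2.1 p.2.2.1 p.2.2.2.1]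
                     else lines ++ [pvFmt p.2.1 p.2.2.1 p.2.2.2.1 ++ " \\"]
        (lines, some p.2.2.2.2)) (acc, prev)).1 = acc ++ gSpec prev l := by
  induction l with
  | nil => intro s acc prev _; simp [PySem.List.enumerate_nil, gSpec]
  | cons x rest ih =>
    intro s acc prev hs
    obtain ⟨nm, k, c, ic⟩ := x
    have hlast : (s = n - 1) ↔ rest = [] := by
      constructor
      · intro h; cases rest with
        | nil => rfl
        | cons y ys => exfalso; simp [List.length] at hs; omega
      · intro h; subst h; simp at hs; omega
    rw [PySem.List.enumerate_cons, List.foldl_cons]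
    simp only []
    rw [ih (s + 1) _ (some ic) (by simp at hs ⊢; omega)]
    by_cases hrest : rest = []
    · simp only [gSpec, hrest, if_pos (hlast.mpr hrest)]
      by_cases hsep : prev = some true ∧ ic = false
      · simp [hsep]
      · simp [hsep]
    · have hne : ¬ (s = n - 1) := fun h => hrest (hlast.mp h)
      simp only [gSpec, if_neg hne, if_neg hrest]
      by_cases hsep : prev = some true ∧ ic = false
      · simp [hsep]
      · simp [hsep]

theorem rawSpec_ne_nil (prev : Option Bool) (x : String × String × String × Bool)
    (rest : List (String × String × String × Bool)) : rawSpec prev (x :: rest) ≠ [] := by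
  obtain ⟨nm, k, c, ic⟩ := x
  by_cases hsep : prev = some true ∧ ic = false <;> simp [rawSpec, hsep]

theorem decorate_cons_cons (a b : String) (l : List String) :
    decorate (a :: b :: l) = (a ++ " \\") :: decorate (b :: l) := by
  simp [decorate]

theorem decorate_raw (l : List (String × String × String × Bool)) :
    ∀ (prev : Option Bool), decorate (rawSpec prev l) = gSpec prev l := by
  induction l with
  | nil => intro prev; simp [rawSpec, gSpec, decorate]
  | cons x rest ih =>
    intro prev
    obtain ⟨nm, k, c, ic⟩ := x
    have core : decorate (pvFmt nm k c :: rawSpec (some ic) rest) =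
        (if rest = [] then [pvFmt nm k c] else [pvFmt nm k c ++ " \\"]) ++ gSpec (some ic) rest := by
      by_cases hrest : rest = []
      · subst hrest; simp [rawSpec, gSpec, decorate]
      · have hne : rawSpec (some ic) rest ≠ [] := by
          cases rest with
          | nil => exact absurd rfl hrest
          | cons y ys => exact rawSpec_ne_nil _ y ys
        obtain ⟨z, zs, hz⟩ := List.exists_cons_of_ne_nil hne
        rw [hz, decorate_cons_cons, ← hz, ih (some ic)]
        simp [hrest]
    by_cases hsep : prev = some true ∧ ic = false
    · rw [show rawSpec prev ((nm, k, c, ic) :: rest) =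
          "    \"\"" :: (pvFmt nm k c :: rawSpec (some ic) rest) from by
        simp [rawSpec, if_pos hsep]]
      rw [decorate_cons_cons, core]
      simp [gSpec, if_pos hsep]
    · rw [show rawSpec prev ((nm, k, c, ic) :: rest) =
          pvFmt nm k c :: rawSpec (some ic) rest from by simp [rawSpec, if_neg hsep]]
      rw [core]
      simp [gSpec, if_neg hsep]

-- the fold of pvStepB with a nonтрив trailing open run computes runsFrom
theorem foldGroups (l : List (String × String × String × Bool)) :
    ∀ (gs : List (Bool × List (String × String × String × Bool))) (b : Bool)
      (g : List (String × String × String × Bool)),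
      List.foldl pvStepB (gs ++ [(b, g)]) l = gs ++ runsFrom b g l := by
  induction l with
  | nil => intro gs b g; simp [runsFrom]
  | cons x xs ih =>
    intro gs b g
    rw [List.foldl_cons]
    by_cases h : b = x.2.2.2
    · rw [show pvStepB (gs ++ [(b, g)]) x = gs ++ [(b, g ++ [x])] from by
        simp [pvStepB, h]]
      rw [ih, runsFrom, if_pos h]
    · rw [show pvStepB (gs ++ [(b, g)]) x = (gs ++ [(b, g)]) ++ [(x.2.2.2, [x])] from by
        simp [pvStepB, h]]
      rw [ih, runsFrom, if_neg h]
      simp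

theorem runsFrom_head (l : List (String × String × String × Bool)) :
    ∀ (b : Bool) (g : List (String × String × String × Bool)),
      ∃ g' rest, runsFrom b g l = (b, g') :: rest := by
  induction l with
  | nil => intro b g; exact ⟨g, [], rfl⟩
  | cons x xs ih =>
    intro b g
    by_cases h : b = x.2.2.2
    · rw [runsFrom, if_pos h]; exact ih b (g ++ [x])
    · rw [runsFrom, if_neg h]; exact ⟨g, _, rfl⟩

theorem foldBody (gtail : List (Bool × List (String × String × String × Bool))) :
    ∀ (acc : List String),
      gtail.foldl (fun acc p =>
        (if p.1 = false then acc ++ ["    \"\""] else acc)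
          ++ p.2.map (fun it => pvFmt it.1 it.2.1 it.2.2.1)) acc = acc ++ tailEmit gtail := by
  induction gtail with
  | nil => intro acc; simp [tailEmit]
  | cons p ps ih =>
    intro acc
    rw [List.foldl_cons]
    rw [ih]
    by_cases h : p.1 = false
    · simp [tailEmit, h, fmtI]
    · simp [tailEmit, h, fmtI]

theorem bodyRuns (l : List (String × String × String × Bool)) :
    ∀ (b : Bool) (g : List (String × String × String × Bool)),
      bodyOf (runsFrom b g l) = g.map fmtI ++ rawSpec (some b) l := by
  induction l with
  | nil => intro b g; simp [runsFrom, bodyOf, tailEmit, rawSpec]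
  | cons x xs ih =>
    intro b g
    obtain ⟨nm, k, c, ic⟩ := x
    by_cases h : b = ic
    · rw [runsFrom, if_pos h, ih]
      subst h
      simp [rawSpec, fmtI]
    · rw [runsFrom, if_neg h]
      obtain ⟨g', rest, hr⟩ := runsFrom_head xs ic [(nm, k, c, ic)]
      have htail : tailEmit (runsFrom ic [(nm, k, c, ic)] xs)
          = (if ic = false then ["    \"\""] else []) ++ bodyOf (runsFrom ic [(nm, k, c, ic)] xs) := by
        rw [hr]; simp [tailEmit, bodyOf]
      have hbody : bodyOf ((b, g) :: runsFrom ic [(nm, k, c, ic)] xs)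
          = g.map fmtI ++ tailEmit (runsFrom ic [(nm, k, c, ic)] xs) := by
        simp [bodyOf]
      rw [hbody, htail, ih]
      cases b <;> cases ic <;> simp_all [rawSpec, fmtI]

theorem alt_eq_decorate_raw (items : List (String × String × String × Bool)) :
    generate_menu_config_alt items = decorate (rawSpec none items) := by
  cases items with
  | nil => simp [generate_menu_config_alt, rawSpec, decorate]
  | cons x xs =>
    obtain ⟨nm, k, c, ic⟩ := x
    have hfold : List.foldl pvStepB [] ((nm, k, c, ic) :: xs) = runsFrom ic [(nm, k, c, ic)] xs := by
      rw [List.foldl_cons,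
        show pvStepB [] (nm, k, c, ic) = ([] : List (Bool × List (String × String × String × Bool))) ++ [(ic, [(nm, k, c, ic)])] from by simp [pvStepB]]
      rw [foldGroups]
      simp
    obtain ⟨g', rest, hr⟩ := runsFrom_head xs ic [(nm, k, c, ic)]
    have hbody : g'.map (fun it => pvFmt it.1 it.2.1 it.2.2.1) ++
        rest.foldl (fun acc p =>
          (if p.1 = false then acc ++ ["    \"\""] else acc)
            ++ p.2.map (fun it => pvFmt it.1 it.2.1 it.2.2.1)) []
        = rawSpec none ((nm, k, c, ic) :: xs) := by
      rw [foldBody]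
      have : g'.map fmtI ++ tailEmit rest = bodyOf (runsFrom ic [(nm, k, c, ic)] xs) := by
        rw [hr]; simp [bodyOf]
      calc g'.map (fun it => pvFmt it.1 it.2.1 it.2.2.1) ++ ([] ++ tailEmit rest)
          = bodyOf (runsFrom ic [(nm, k, c, ic)] xs) := by
            simpa [fmtI] using this
        _ = rawSpec none ((nm, k, c, ic) :: xs) := by
            rw [bodyRuns]
            simp [rawSpec, fmtI]
    simp only [generate_menu_config_alt, hfold, hr]
    rw [hbody]
    rfl

-- ===== VERDICT (by name: the statement is the Claim_ definition above) =====
theorem generate_menu_config_spec : Claim_equal_generate_menu_config := by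
  intro items _
  unfold Spec_generate_menu_config generate_menu_config
  rw [foldA (items.length : Int) items 0 [] none (by simp), alt_eq_decorate_raw]
  simp only [List.nil_append]
  exact (decorate_raw items none).symm
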